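-- pv_equiv track=rewrite | github.com/robertatagile/BankStatementProcessor | src/pipeline/pdf_extractor.py | _merge_multiline_descriptions
-- ===== SOURCE A (Python) =====
-- def _merge_multiline_descriptions(lines: list[dict]) -> list[dict]:
--     """Merge continuation lines into the previous transaction's description."""
--     merged = []
--     for line in lines:
--         if line.get("_continuation") and merged:
--             merged[-1]["description"] += " " + line["description"]
--         elif not line.get("_continuation"):
--             merged.append(line)
--     return merged
-- ===== SOURCE B (Python) =====
-- def _merge_multiline_descriptions(lines: list[dict]) -> list[dict]:
--     """Merge continuation lines into the previous transaction's description.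
--
--     Run-based scan: skip leading continuation lines (they have no anchor),
--     then repeatedly consume one anchor together with its whole run of
--     continuation lines, joining all their descriptions at once.
--     """
--     merged = []
--     n = len(lines)
--     i = 0
--     while i < n and lines[i].get("_continuation"):
--         i += 1
--     while i < n:
--         anchor = lines[i]
--         j = i + 1
--         parts = []
--         while j < n and lines[j].get("_continuation"):
--             parts.append(lines[j]["description"])
--             j += 1
--         if parts:
--             anchor["description"] = " ".join([anchor["description"]] + parts)
--         merged.append(anchor)
--         i = j
--     return merged
-- ===== Notes on version B (the rewrite author's own statement) =====
-- stated objective: alternative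
-- what changed: B replaces A's fold that appends each continuation's text one += at a time onto the tail of the growing result by a run-based index scan: it skips leading continuations, then consumes each anchor together with its entire run of continuation lines at once, building the merged description with a single join.
import Mathlib
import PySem

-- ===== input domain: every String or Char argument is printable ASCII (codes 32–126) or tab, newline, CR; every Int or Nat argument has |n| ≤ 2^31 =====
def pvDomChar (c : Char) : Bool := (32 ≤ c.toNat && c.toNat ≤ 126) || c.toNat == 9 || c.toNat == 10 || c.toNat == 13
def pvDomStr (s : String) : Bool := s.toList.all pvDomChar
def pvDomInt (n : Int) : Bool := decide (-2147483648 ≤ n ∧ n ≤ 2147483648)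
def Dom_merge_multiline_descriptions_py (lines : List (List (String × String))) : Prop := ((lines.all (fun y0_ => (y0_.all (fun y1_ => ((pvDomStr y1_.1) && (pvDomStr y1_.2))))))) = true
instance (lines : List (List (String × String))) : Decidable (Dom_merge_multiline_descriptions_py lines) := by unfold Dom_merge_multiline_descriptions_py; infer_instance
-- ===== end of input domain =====

-- B merges continuations by a run-based scan (skip leading continuations, then
-- consume each anchor together with its whole run of continuation lines,
-- joining their descriptions at once) instead of A's fold that appends one
-- continuation at a time onto the tail of the growing result; same cost.
-- Both Pythons mutate the input dicts in place the same way; equivalence here is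
-- about the RETURN value.

-- Shared transliterations of the Python expressions both programs use verbatim:
-- `line.get("_continuation")` truthiness (None and "" are falsy) …
def pvCont (line : List (String × String)) : Bool :=
  !(((PySem.Dict.mk line).getD "_continuation" "").isEmpty)
-- … and `line["description"]` (Pre_ guarantees the key where Python reads it).
def pvDesc (line : List (String × String)) : String :=
  (PySem.Dict.mk line).getD "description" ""

-- ===== PORT A =====
-- `d["description"] += " " + s` (overwrite in place, order kept)
def pvAddDesc (line : List (String × String)) (s : String) : List (String × String) :=
  ((PySem.Dict.mk line).modify "description" "" (fun d => d ++ " " ++ s)).items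

-- one pass; `merged[-1]["description"] += …` = rewrite the last element of merged
def pvStepA (merged : List (List (String × String))) (line : List (String × String)) :
    List (List (String × String)) :=
  if pvCont line then
    match merged.getLast? with
    | some last => merged.dropLast ++ [pvAddDesc last (pvDesc line)]
    | none => merged
  else merged ++ [line]

def merge_multiline_descriptions_py (lines : List (List (String × String))) : List (List (String × String)) :=
  lines.foldl pvStepA []

-- ===== PORT B =====
-- `anchor["description"] = v` (overwrite in place, order kept)
def pvSetDesc (line : List (String × String)) (v : String) : List (String × String) :=
  ((PySem.Dict.mk line).insert "description" v).items

-- the inner `while j < n and lines[j].get("_continuation")` run of B's scan: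
-- one anchor plus its run of continuation lines, `" ".join(...)` at once
def pvChunksB : List (List (String × String)) → List (List (String × String))
  | [] => []
  | anchor :: rest =>
    let parts := (rest.takeWhile pvCont).map pvDesc
    (if parts.isEmpty then anchor
     else pvSetDesc anchor (PySem.Str.join " " (pvDesc anchor :: parts)))
      :: pvChunksB (rest.dropWhile pvCont)
termination_by l => l.length
decreasing_by simpa using Nat.lt_succ_of_le (List.length_dropWhile_le _ _)

def merge_multiline_descriptions_py_alt (lines : List (List (String × String))) : List (List (String × String)) :=
  pvChunksB (lines.dropWhile pvCont)

-- ===== PRECONDITION & SPEC =====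
-- Pre_ excludes exactly the inputs on which Python A raises KeyError: a truthy
-- continuation line that has a preceding non-continuation line but either lacks
-- "description" itself or whose anchor (the last preceding non-continuation
-- line) lacks it. B raises there too.
def Pre_merge_multiline_descriptions_py (lines : List (List (String × String))) : Prop :=
  ((List.range lines.length).all (fun i => (List.range i).all (fun j =>
    !(pvCont lines[i]! && !(pvCont lines[j]!) &&
      ((List.range i).all (fun k => decide (k ≤ j) || pvCont lines[k]!)) &&
      !((PySem.Dict.mk lines[i]!).contains "description" &&
        (PySem.Dict.mk lines[j]!).contains "description"))))) = true
instance (lines : List (List (String × String))) : Decidable (Pre_merge_multiline_descriptions_py lines) := by unfold Pre_merge_multiline_descriptions_py; infer_instance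

def pvWitness_merge_multiline_descriptions_py : (List (List (String × String))) :=
  [[("description", "pay"), ("_continuation", "")], [("description", "rent"), ("_continuation", "y")]]

def Spec_merge_multiline_descriptions_py (lines : List (List (String × String))) (out : List (List (String × String))) : Prop := out = merge_multiline_descriptions_py_alt lines
instance (lines : List (List (String × String))) (out : List (List (String × String))) : Decidable (Spec_merge_multiline_descriptions_py lines out) := by unfold Spec_merge_multiline_descriptions_py; infer_instance

-- ===== CLAIM (what is proved, stated in full; the proofs are below) =====
def Claim_equal_merge_multiline_descriptions_py : Prop := ∀ (lines : List (List (String × String))), Dom_merge_multiline_descriptions_py lines → Pre_merge_multiline_descriptions_py lines → Spec_merge_multiline_descriptions_py lines (merge_multiline_descriptions_py lines)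

-- ===== LEMMAS AND PROOFS =====

-- A's `+=` on the "description" key is B's overwrite with the grown string.
theorem pvAddDesc_eq_set (a : List (String × String)) (s : String) :
    pvAddDesc a s = pvSetDesc a (pvDesc a ++ " " ++ s) := rfl

theorem pvDesc_set (a : List (String × String)) (v : String) :
    pvDesc (pvSetDesc a v) = v := by
  unfold pvDesc pvSetDesc
  exact PySem.Dict.getD_insert_self ..

theorem pvSet_set (a : List (String × String)) (v w : String) :
    pvSetDesc (pvSetDesc a v) w = pvSetDesc a w := by
  unfold pvSetDesc
  exact congrArg PySem.Dict.items (PySem.Dict.insert_insert_self ..)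

-- " ".join absorbs an already-joined head: join((x+" "+y)::zs) = join(x::y::zs)
theorem pvJoin_absorb (x y : String) (zs : List String) :
    PySem.Str.join " " ((x ++ " " ++ y) :: zs) = PySem.Str.join " " (x :: y :: zs) := by
  have hchars : ∀ (a b : List Char) (cl : List (List Char)),
      PySem.Chars.join [' '] ((a ++ ' ' :: b) :: cl) =
        a ++ ' ' :: PySem.Chars.join [' '] (b :: cl) := by
    intro a b cl
    cases cl <;> simp [PySem.Chars.join, List.intercalate, List.intersperse]
  have h2 : ∀ (a b : List Char) (cl : List (List Char)),
      PySem.Chars.join [' '] (a :: b :: cl) = a ++ ' ' :: PySem.Chars.join [' '] (b :: cl) := by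
    intro a b cl
    cases cl <;> simp [PySem.Chars.join, List.intercalate, List.intersperse]
  apply String.ext
  simp [PySem.Str.join, hchars, h2]

-- A's left-to-right run of `+=`s over a run of continuations equals B's single join.
theorem pvRun_eq_chunk (cs : List (List (String × String))) :
    ∀ a, cs.foldl (fun x c => pvAddDesc x (pvDesc c)) a =
      if ((cs.map pvDesc).isEmpty) then a
      else pvSetDesc a (PySem.Str.join " " (pvDesc a :: cs.map pvDesc)) := by
  induction cs with
  | nil => intro a; simp
  | cons c cs ih =>
    intro a
    rw [List.foldl_cons, ih (pvAddDesc a (pvDesc c))]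
    cases cs with
    | nil =>
      simp only [List.map_nil, List.isEmpty_nil, if_pos, List.map_cons, List.isEmpty_cons,
        if_neg Bool.false_ne_true]
      rw [pvAddDesc_eq_set]
      congr 1
      have : PySem.Str.join " " [pvDesc a, pvDesc c] = pvDesc a ++ " " ++ pvDesc c := by
        have := pvJoin_absorb (pvDesc a) (pvDesc c) []
        apply String.ext
        simp [PySem.Str.join, PySem.Chars.join, List.intercalate, List.intersperse]
      rw [this]
    | cons c' cs' =>
      simp only [List.map_cons, List.isEmpty_cons, if_neg Bool.false_ne_true]
      rw [pvAddDesc_eq_set, pvDesc_set, pvSet_set, pvJoin_absorb]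

-- A continuation run cs is absorbed one += at a time into the last kept element.
theorem pv_fold_run (cs : List (List (String × String))) :
    (∀ c ∈ cs, pvCont c = true) →
    ∀ (front : List (List (String × String))) (a : List (String × String))
      (t : List (List (String × String))),
      List.foldl pvStepA (front ++ [a]) (cs ++ t) =
        List.foldl pvStepA (front ++ [cs.foldl (fun x c => pvAddDesc x (pvDesc c)) a]) t := by
  induction cs with
  | nil => intro _ front a t; simp
  | cons c cs ih =>
    intro h front a t
    have hc : pvCont c = true := h c (by simp)
    have hstep : pvStepA (front ++ [a]) c = front ++ [pvAddDesc a (pvDesc c)] := by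
      simp [pvStepA, hc]
    rw [List.cons_append, List.foldl_cons, hstep,
      ih (fun c hm => h c (by simp [hm])) front (pvAddDesc a (pvDesc c)) t]
    simp

-- A drops leading continuation lines (merged still empty) — B's first skip loop.
theorem pv_fold_nil_dropWhile (lines : List (List (String × String))) :
    List.foldl pvStepA [] lines = List.foldl pvStepA [] (lines.dropWhile pvCont) := by
  induction lines with
  | nil => rfl
  | cons l ls ih =>
    by_cases hc : pvCont l = true
    · rw [List.foldl_cons, show pvStepA [] l = [] by simp [pvStepA, hc],
        List.dropWhile_cons_of_pos hc, ih]
    · simp only [Bool.not_eq_true] at hc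
      rw [List.dropWhile_cons_of_neg (by simp [hc])]

theorem pv_head_dropWhile {α : Type} (p : α → Bool) (l : List α) :
    ∀ x ∈ (l.dropWhile p).head?, p x = false := by
  induction l with
  | nil => simp
  | cons a l ih =>
    by_cases h : p a = true
    · rw [List.dropWhile_cons_of_pos h]; exact ih
    · simp only [Bool.not_eq_true] at h
      rw [List.dropWhile_cons_of_neg (by simp [h])]
      simpa using h

-- Main invariant: on a list whose head is not a continuation, A's fold appends
-- exactly B's chunked result to the accumulator.
theorem pv_main (L : List (List (String × String)))
    (h : ∀ x ∈ L.head?, pvCont x = false) :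
    ∀ front, List.foldl pvStepA front L = front ++ pvChunksB L := by
  match L with
  | [] => intro front; simp [pvChunksB]
  | a :: rest =>
    intro front
    have ha : pvCont a = false := h a (by simp)
    have hstep : pvStepA front a = front ++ [a] := by simp [pvStepA, ha]
    have hsplit : rest = rest.takeWhile pvCont ++ rest.dropWhile pvCont :=
      (List.takeWhile_append_dropWhile).symm
    rw [List.foldl_cons, hstep]
    conv_lhs => rw [hsplit]
    rw [pv_fold_run (rest.takeWhile pvCont)
        (fun c hm => List.mem_takeWhile_imp hm) front a (rest.dropWhile pvCont),
      pv_main (rest.dropWhile pvCont) (pv_head_dropWhile pvCont rest)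
        (front ++ [List.foldl (fun x c => pvAddDesc x (pvDesc c)) a (rest.takeWhile pvCont)])]
    rw [pvRun_eq_chunk (rest.takeWhile pvCont) a]
    simp [pvChunksB, List.append_assoc]
termination_by L.length
decreasing_by simpa using Nat.lt_succ_of_le (List.length_dropWhile_le _ _)

-- ===== VERDICT (by name: the statement is the Claim_ definition above) =====
theorem merge_multiline_descriptions_py_spec : Claim_equal_merge_multiline_descriptions_py := by
  intro lines _ _
  unfold Spec_merge_multiline_descriptions_py merge_multiline_descriptions_py merge_multiline_descriptions_py_alt
  rw [pv_fold_nil_dropWhile lines]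
  simpa using pv_main (lines.dropWhile pvCont) (pv_head_dropWhile pvCont lines) []
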